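-- pv_equiv track=rewrite | github.com/42nd-chris/codejam | 2009/1C/A-All_Your_Base.py | get_digit_values
-- ===== SOURCE A (Python) =====
-- def get_digit_values(num_str, base):
-- 	"""Returns a dictionary where the key is the char in it's input
-- 	   form, the value is it's numerical value for it's output."""
--
-- 	# Dictionary will be used to translate the input string to
-- 	# the proper solution
-- 	digit_dict = {}
--
-- 	# in order to get the lowest possible value, the value of the characters
-- 	# should follow the pattern: 1, 0, 2 ... n where n == base
-- 	values = [1, 0] + [x for x in range(2, base)]
--
-- 	# loop through characters of string, assigning the lowest possible
-- 	# value to each character the first time it is seen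
-- 	for c in num_str:
-- 		if c in digit_dict.keys():
-- 			continue
-- 		digit_dict[c] = values.pop(0)
--
-- 	return digit_dict
-- ===== SOURCE B (Python) =====
-- def get_digit_values(num_str, base):
-- 	"""Returns a dictionary where the key is the char in it's input
-- 	   form, the value is it's numerical value for it's output."""
-- 	# Rank the distinct characters by sorting them on their first position
-- 	# in the string, then pair the ranked characters with the value
-- 	# sequence 1, 0, 2, 3, ... via zip.
-- 	values = [1, 0] + list(range(2, base))
-- 	chars = sorted(set(num_str), key=num_str.find)
-- 	return dict(zip(chars, values))
-- ===== Notes on version B (the rewrite author's own statement) =====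
-- stated objective: idiomatic
-- what changed: B replaces A's single-pass membership-test-and-pop(0) loop by a staged pipeline: take the distinct characters as a set, sort them by their first position in the string (sorted(set(s), key=s.find)), and pair the ranked characters with the value sequence via dict(zip(chars, values)). (the staged passes run in C, removing the per-character Python-level membership test and pop(0) shifting)
import Mathlib
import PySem

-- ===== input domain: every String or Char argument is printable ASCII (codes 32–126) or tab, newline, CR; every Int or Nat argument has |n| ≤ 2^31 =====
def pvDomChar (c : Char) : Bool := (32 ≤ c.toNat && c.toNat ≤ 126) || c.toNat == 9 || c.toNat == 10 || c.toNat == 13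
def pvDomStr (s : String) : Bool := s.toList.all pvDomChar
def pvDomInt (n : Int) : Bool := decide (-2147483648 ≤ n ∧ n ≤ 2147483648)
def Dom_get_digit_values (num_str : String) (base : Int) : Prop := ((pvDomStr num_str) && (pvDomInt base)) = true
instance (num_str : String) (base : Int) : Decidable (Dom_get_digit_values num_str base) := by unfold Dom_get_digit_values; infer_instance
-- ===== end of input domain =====

-- B replaces A's membership-test-and-pop loop by a staged pipeline — sort the distinct
-- characters by first position, zip them with the value sequence (idiomatic); Pre_ excludes
-- the inputs where A raises IndexError (there B's zip truncates instead of raising).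


-- ===== PORT A =====
def get_digit_values (num_str : String) (base : Int) : List (String × Int) :=
  let values : List Int := [1, 0] ++ PySem.List.pyRange 2 base 1
  let st := num_str.toList.foldl
    (fun (st : PySem.Dict String Int × List Int) c =>
      if st.1.contains (String.ofList [c]) then st
      else
        match PySem.List.pop? st.2 0 with
        | some (v, rest) => (st.1.insert (String.ofList [c]) v, rest)
        | none => st   -- Python raises IndexError (pop from empty list) here; excluded by Pre_
    ) (PySem.Dict.empty, values)
  st.1.items

-- ===== PORT B =====
def get_digit_values_alt (num_str : String) (base : Int) : List (String × Int) :=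
  let values : List Int := [1, 0] ++ PySem.List.pyRange 2 base 1
  let chars : List Char :=
    PySem.List.sorted (PySem.Set.ofList num_str.toList)
      (fun c => PySem.Str.find num_str (String.ofList [c])) false
  (PySem.Dict.ofList ((chars.zip values).map (fun p => (String.ofList [p.1], p.2)))).items

-- ===== PRECONDITION & SPEC =====
-- Pre_ excludes exactly the inputs on which A raises IndexError (pop from the exhausted
-- values list): strings with more distinct characters than the max(2, base) available values.
def Pre_get_digit_values (num_str : String) (base : Int) : Prop :=
  ((PySem.List.dedup num_str.toList).length : Int) ≤ max 2 base
instance (num_str : String) (base : Int) : Decidable (Pre_get_digit_values num_str base) := by unfold Pre_get_digit_values; infer_instance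

def pvWitness_get_digit_values : String × Int := ("aba1", 4)

def Spec_get_digit_values (num_str : String) (base : Int) (out : List (String × Int)) : Prop := out = get_digit_values_alt num_str base
instance (num_str : String) (base : Int) (out : List (String × Int)) : Decidable (Spec_get_digit_values num_str base out) := by unfold Spec_get_digit_values; infer_instance

-- ===== CLAIM (what is proved, stated in full; the proofs are below) =====
def Claim_equal_get_digit_values : Prop := ∀ (num_str : String) (base : Int), Dom_get_digit_values num_str base → Pre_get_digit_values num_str base → Spec_get_digit_values num_str base (get_digit_values num_str base)

-- ===== LEMMAS AND PROOFS =====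

-- value assigned to the i-th distinct character
def pvValOf (i : Int) : Int := if i = 0 then 1 else if i = 1 then 0 else i

-- the dict A has built once the first-occurrence list s has been consumed
def pvDict (s : List Char) : PySem.Dict String Int :=
  PySem.Dict.mk ((PySem.List.enumerate s).map (fun p => (String.ofList [p.2], pvValOf p.1)))

lemma pvMk_inj : Function.Injective (fun c : Char => String.ofList [c]) := by
  intro a b h
  have := congrArg String.toList h
  simpa using this

lemma pvKeys_pvDict (s : List Char) : (pvDict s).keys = s.map (fun c => String.ofList [c]) := by
  simp only [pvDict, PySem.Dict.keys_mk, List.map_map]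
  have := PySem.List.map_snd_enumerate s 0
  conv_rhs => rw [← this]
  rw [List.map_map]
  rfl

lemma pvContains_pvDict (s : List Char) (c : Char) :
    (pvDict s).contains (String.ofList [c]) = decide (c ∈ s) := by
  rw [PySem.Dict.contains_eq_decide_mem_keys, pvKeys_pvDict]
  by_cases hc : c ∈ s
  · simp [hc, List.mem_map_of_injective pvMk_inj]
  · simp [hc, List.mem_map_of_injective pvMk_inj]

lemma pvLen_mono : ∀ (cs s : List Char), s.length ≤ (cs.foldl PySem.Set.add s).length := by
  intro cs
  induction cs with
  | nil => intro s; simp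
  | cons c cs ih =>
    intro s
    refine le_trans ?_ (ih (PySem.Set.add s c))
    rw [PySem.Set.add_eq_ite]
    split <;> simp

lemma pvV_get (base : Int) (i : Nat) (h : i < ([1, 0] ++ PySem.List.pyRange 2 base 1 : List Int).length) :
    ([1, 0] ++ PySem.List.pyRange 2 base 1 : List Int)[i] = pvValOf i := by
  match i with
  | 0 => simp [pvValOf]
  | 1 => simp [pvValOf]
  | (n+2) =>
    have hl : n < (PySem.List.pyRange 2 base 1).length := by simpa using h
    have := PySem.List.getElem_pyRange_one 2 base n hl
    rw [List.getElem_append_right (by simp : ([1,0]:List Int).length ≤ n+2)]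
    simp only [List.length_cons, List.length_nil]
    simp only [show n + 2 - (0 + 1 + 1) = n from by omega]
    rw [this]
    unfold pvValOf
    rw [if_neg (by omega), if_neg (by omega)]
    push_cast; ring

-- loop invariant for A's for-loop
lemma pvInv (base : Int) :
    ∀ (cs s : List Char), s.Nodup →
      (cs.foldl PySem.Set.add s).length ≤ ([1, 0] ++ PySem.List.pyRange 2 base 1 : List Int).length →
      cs.foldl
        (fun (st : PySem.Dict String Int × List Int) c =>
          if st.1.contains (String.ofList [c]) then st
          else
            match PySem.List.pop? st.2 0 with
            | some (v, rest) => (st.1.insert (String.ofList [c]) v, rest)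
            | none => st)
        (pvDict s, ([1, 0] ++ PySem.List.pyRange 2 base 1 : List Int).drop s.length)
      = (pvDict (cs.foldl PySem.Set.add s),
         ([1, 0] ++ PySem.List.pyRange 2 base 1 : List Int).drop (cs.foldl PySem.Set.add s).length) := by
  intro cs
  induction cs with
  | nil => intro s hnd hlen; simp
  | cons c cs ih =>
    intro s hnd hlen
    rw [List.foldl_cons, List.foldl_cons] at *
    by_cases hc : c ∈ s
    · rw [PySem.Set.add_of_mem hc] at *
      rw [if_pos (by rw [pvContains_pvDict]; simpa using hc)]
      exact ih s hnd hlen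
    · rw [PySem.Set.add_of_not_mem hc] at *
      have hlt : s.length < ([1, 0] ++ PySem.List.pyRange 2 base 1 : List Int).length := by
        have := pvLen_mono cs (s ++ [c])
        simp only [List.length_append, List.length_cons, List.length_nil] at this
        omega
      rw [if_neg (by rw [pvContains_pvDict]; simpa using hc)]
      rw [List.drop_eq_getElem_cons hlt, PySem.List.pop?_zero_cons]
      have hdict : (pvDict s).insert (String.ofList [c])
          ([1, 0] ++ PySem.List.pyRange 2 base 1 : List Int)[s.length] = pvDict (s ++ [c]) := by
        apply PySem.Dict.ext
        rw [PySem.Dict.items_insert_of_not_contains _ _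
          (by rw [pvContains_pvDict]; simpa using hc)]
        simp only [pvDict, PySem.List.enumerate_append, List.map_append,
          PySem.List.enumerate_cons, PySem.List.enumerate_nil]
        rw [pvV_get base s.length hlt]
        simp
      simp only [hdict]
      have hlen2 : ([1, 0] ++ PySem.List.pyRange 2 base 1 : List Int).drop (s.length + 1)
          = ([1, 0] ++ PySem.List.pyRange 2 base 1 : List Int).drop (s ++ [c]).length := by
        simp
      rw [hlen2]
      exact ih (s ++ [c]) (by simp [List.nodup_append, hnd]; exact fun a ha he => hc (he ▸ ha)) hlen

-- A equals the explicit enumerate-map list (on Pre_)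
lemma pvA_eq (num_str : String) (base : Int)
    (hp : ((PySem.List.dedup num_str.toList).length : Int) ≤ max 2 base) :
    get_digit_values num_str base
      = (PySem.List.enumerate (PySem.List.dedup num_str.toList)).map
          (fun p => (String.ofList [p.2], pvValOf p.1)) := by
  have hVlen : ((([1,0] ++ PySem.List.pyRange 2 base 1 : List Int)).length : Int) = max 2 base := by
    simp [PySem.List.length_pyRange_one]
    omega
  have hfold : num_str.toList.foldl PySem.Set.add [] = PySem.List.dedup num_str.toList := by
    rw [PySem.List.dedup_eq_ofList, PySem.Set.ofList_eq_foldl]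
  have hlen : (num_str.toList.foldl PySem.Set.add []).length
      ≤ ([1,0] ++ PySem.List.pyRange 2 base 1 : List Int).length := by
    rw [hfold]
    omega
  have hinv := pvInv base num_str.toList [] List.nodup_nil hlen
  simp only [List.drop_zero, List.length_nil] at hinv
  have h0 : pvDict [] = PySem.Dict.empty := rfl
  rw [h0] at hinv
  show (num_str.toList.foldl _ (PySem.Dict.empty, [1,0] ++ PySem.List.pyRange 2 base 1)).1.items = _
  rw [hinv, hfold]
  rfl

-- idxOf characterisation: the first position carrying a
lemma pvIdxOf_eq (s : List Char) (a : Char) (k : Nat) (hk : k < s.length)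
    (h1 : s[k] = a) (h2 : ∀ j, j < k → (hj : j < s.length) → s[j] ≠ a) :
    s.idxOf a = k := by
  induction s generalizing k with
  | nil => simp at hk
  | cons x xs ih =>
    match k with
    | 0 =>
      simp at h1
      simp [h1, List.idxOf_cons_self]
    | (k+1) =>
      have hx : x ≠ a := by
        have := h2 0 (by omega) (by simp)
        simpa using this
      rw [List.idxOf_cons_ne _ (by simpa using hx)]
      have := ih k (by simpa using hk) (by simpa using h1)
        (fun j hj hjl => by
          have := h2 (j+1) (by omega) (by simpa using hjl)
          simpa using this)
      omega

-- find of a single character is its idxOf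
lemma pvFind_single (s : List Char) (a : Char) (h : a ∈ s) :
    PySem.Chars.find s [a] = (s.idxOf a : Int) := by
  have hinf : ([a] : List Char) <:+: s := by
    obtain ⟨l, r, rfl⟩ := List.append_of_mem h
    exact ⟨l, r, by simp⟩
  have hpos : 0 ≤ PySem.Chars.find s [a] := (PySem.Chars.find_nonneg_iff s [a]).2 hinf
  obtain ⟨hpre, hmin⟩ := PySem.Chars.find_spec hpos
  set k := (PySem.Chars.find s [a]).toNat with hkdef
  rcases hpre with ⟨t, ht⟩
  have hklen : k < s.length := by
    have hlen : (s.drop k).length = t.length + 1 := by rw [← ht]; simp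
    simp only [List.length_drop] at hlen
    omega
  have hs : s[k] = a := by
    have h0 : (s.drop k)[0]'(by rw [← ht]; simp) = a := by
      simp [← ht]
    simpa using h0
  have hidx := pvIdxOf_eq s a k hklen hs (fun j hj hjl hja => by
    refine hmin j (by omega) ⟨s.drop (j+1), ?_⟩
    rw [← hja]
    exact List.getElem_cons_drop hjl)
  omega

-- the deduplicated list is strictly increasing in idxOf
lemma pvPairwise_idxOf : ∀ (s : List Char),
    (PySem.List.dedup s).Pairwise (fun a b => s.idxOf a < s.idxOf b) := by
  intro s
  induction s with
  | nil => simp [PySem.List.dedup_eq_ofList, PySem.Set.ofList_nil]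
  | cons c s ih =>
    rw [PySem.List.dedup_eq_ofList, PySem.Set.ofList_cons]
    constructor
    · intro b hb
      have hbne : b ≠ c := ((PySem.Set.mem_discard _ _ _).1 hb).2
      rw [List.idxOf_cons_self, List.idxOf_cons_ne _ (by simpa using hbne.symm)]
      omega
    · have hsub : (PySem.Set.discard (PySem.Set.ofList s) c).Sublist (PySem.Set.ofList s) := by
        rw [PySem.Set.discard]
        exact List.filter_sublist
      have hpw : (PySem.Set.discard (PySem.Set.ofList s) c).Pairwise
          (fun a b => s.idxOf a < s.idxOf b) := by
        refine List.Pairwise.sublist hsub ?_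
        rw [← PySem.List.dedup_eq_ofList]
        exact ih
      rw [List.pairwise_iff_getElem] at hpw ⊢
      intro i j hi hj hij
      have hne1 : (PySem.Set.discard (PySem.Set.ofList s) c)[i] ≠ c :=
        ((PySem.Set.mem_discard _ _ _).1 (List.getElem_mem hi)).2
      have hne2 : (PySem.Set.discard (PySem.Set.ofList s) c)[j] ≠ c :=
        ((PySem.Set.mem_discard _ _ _).1 (List.getElem_mem hj)).2
      rw [List.idxOf_cons_ne _ (by simpa using hne1.symm),
          List.idxOf_cons_ne _ (by simpa using hne2.symm)]
      have := hpw i j hi hj hij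
      omega

-- B's sorted set is exactly the first-occurrence dedup list
lemma pvSorted_eq (num_str : String) :
    PySem.List.sorted (PySem.Set.ofList num_str.toList)
      (fun c => PySem.Str.find num_str (String.ofList [c])) false
    = PySem.List.dedup num_str.toList := by
  apply PySem.List.sorted_eq_of_perm_of_pairwise_lt
  · rw [PySem.List.dedup_eq_ofList]
  · have hpw := pvPairwise_idxOf num_str.toList
    refine hpw.imp_of_mem ?_
    intro a b ha hb hlt
    have ha' : a ∈ num_str.toList := (PySem.List.mem_dedup _ _).1 ha
    have hb' : b ∈ num_str.toList := (PySem.List.mem_dedup _ _).1 hb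
    have hfa : PySem.Str.find num_str (String.ofList [a]) = (num_str.toList.idxOf a : Int) := by
      rw [PySem.Str.find_eq]
      simpa using pvFind_single num_str.toList a ha'
    have hfb : PySem.Str.find num_str (String.ofList [b]) = (num_str.toList.idxOf b : Int) := by
      rw [PySem.Str.find_eq]
      simpa using pvFind_single num_str.toList b hb'
    rw [hfa, hfb]
    exact_mod_cast hlt

-- B equals the explicit enumerate-map list (on Pre_)
lemma pvB_eq (num_str : String) (base : Int)
    (hp : ((PySem.List.dedup num_str.toList).length : Int) ≤ max 2 base) :
    get_digit_values_alt num_str base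
      = (PySem.List.enumerate (PySem.List.dedup num_str.toList)).map
          (fun p => (String.ofList [p.2], pvValOf p.1)) := by
  have hVlen : ((([1,0] ++ PySem.List.pyRange 2 base 1 : List Int)).length : Int) = max 2 base := by
    simp [PySem.List.length_pyRange_one]
    omega
  have hle : (PySem.List.dedup num_str.toList).length
      ≤ ([1,0] ++ PySem.List.pyRange 2 base 1 : List Int).length := by
    omega
  unfold get_digit_values_alt
  rw [pvSorted_eq]
  have hmapfst : ((PySem.List.dedup num_str.toList).zip
        ([1,0] ++ PySem.List.pyRange 2 base 1 : List Int)).map Prod.fst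
      = PySem.List.dedup num_str.toList := by
    rw [List.map_fst_zip]
    exact hle
  have hfresh : ∀ a ∈ ((PySem.List.dedup num_str.toList).zip
        ([1,0] ++ PySem.List.pyRange 2 base 1 : List Int)).map
        (fun p => (String.ofList [p.1], p.2)),
      (PySem.Dict.empty : PySem.Dict String Int).contains a.1 = false := by
    intro a _
    simp
  have hnodup : (((PySem.List.dedup num_str.toList).zip
        ([1,0] ++ PySem.List.pyRange 2 base 1 : List Int)).map
        (fun p => (String.ofList [p.1], p.2))).map (fun a => a.1) |>.Nodup := by
    rw [List.map_map]
    have heq : ((fun a => a.1) ∘ fun (p : Char × Int) => (String.ofList [p.1], p.2))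
        = (fun c : Char => String.ofList [c]) ∘ Prod.fst := rfl
    rw [heq, ← List.map_map, hmapfst]
    exact (PySem.List.nodup_dedup _).map pvMk_inj
  show (PySem.Dict.ofList _).items = _
  have hfold : (PySem.Dict.ofList (((PySem.List.dedup num_str.toList).zip
        ([1,0] ++ PySem.List.pyRange 2 base 1 : List Int)).map
        (fun p => (String.ofList [p.1], p.2)))).items
      = (PySem.Dict.empty : PySem.Dict String Int).items
        ++ (((PySem.List.dedup num_str.toList).zip
        ([1,0] ++ PySem.List.pyRange 2 base 1 : List Int)).map
        (fun p => (String.ofList [p.1], p.2))).map (fun a => (a.1, a.2)) := by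
    exact PySem.Dict.items_foldl_insert_fresh _ _ _ _ hfresh hnodup
  have h0 : (PySem.Dict.empty : PySem.Dict String Int).items = [] := rfl
  rw [hfold, h0, List.nil_append]
  apply List.ext_getElem
  · simp only [List.length_map, List.length_zip, PySem.List.length_enumerate]
    omega
  · intro i h1 h2
    have hiD : i < (PySem.List.dedup num_str.toList).length := by
      simp only [List.length_map, PySem.List.length_enumerate] at h2
      exact h2
    have hiV : i < ([1,0] ++ PySem.List.pyRange 2 base 1 : List Int).length := by
      omega
    simp only [List.getElem_map, List.getElem_zip, PySem.List.getElem_enumerate]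
    rw [pvV_get base i hiV]
    simp

lemma pvMain (num_str : String) (base : Int)
    (hp : ((PySem.List.dedup num_str.toList).length : Int) ≤ max 2 base) :
    get_digit_values num_str base = get_digit_values_alt num_str base := by
  rw [pvA_eq num_str base hp, pvB_eq num_str base hp]

-- ===== VERDICT (by name: the statement is the Claim_ definition above) =====
theorem get_digit_values_spec : Claim_equal_get_digit_values := by
  intro num_str base _ hp
  unfold Pre_get_digit_values at hp
  unfold Spec_get_digit_values
  exact pvMain num_str base hp
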